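-- pv_equiv track=rewrite | github.com/Jackbutler1991/AQA_Alexander_P | HW4/for_loops.py | sum_sab_numbers
-- ===== SOURCE A (Python) =====
-- def sum_sab_numbers(numbers):
--     count, num_sub, num_pos = 0, 0, 1
--     for item in numbers:
--         if item < 0:
--             num_sub = num_sub + item
--             count = count + 1
--         else:
--             num_pos = num_pos * item
--     return count, num_sub, num_pos
-- ===== SOURCE B (Python) =====
-- def sum_sab_numbers(numbers):
--     negs = [x for x in numbers if x < 0]
--     nonnegs = [x for x in numbers if x >= 0]
--     num_pos = 1
--     for x in nonnegs:
--         num_pos *= x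
--     return (len(negs), sum(negs), num_pos)
-- ===== Notes on version B (the rewrite author's own statement) =====
-- stated objective: alternative
-- what changed: Replaces the single fused loop over three accumulators by a partition into negatives and non-negatives followed by three independent reductions (length, sum, product).
import Mathlib
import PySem

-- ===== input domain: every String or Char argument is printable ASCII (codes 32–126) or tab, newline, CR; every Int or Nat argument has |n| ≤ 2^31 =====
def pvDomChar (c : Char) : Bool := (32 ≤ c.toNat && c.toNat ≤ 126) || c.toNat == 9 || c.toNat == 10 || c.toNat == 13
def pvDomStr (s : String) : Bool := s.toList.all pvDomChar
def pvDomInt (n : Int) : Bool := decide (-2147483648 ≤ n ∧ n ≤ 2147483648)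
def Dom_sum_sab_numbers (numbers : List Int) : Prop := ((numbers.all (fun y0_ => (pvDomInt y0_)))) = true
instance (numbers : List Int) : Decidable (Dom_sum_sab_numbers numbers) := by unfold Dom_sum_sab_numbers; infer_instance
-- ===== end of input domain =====

-- B replaces A's single fused loop by a partition into negatives / non-negatives and three independent reductions; same O(n) cost.

-- ===== PORT A =====
def sum_sab_numbers (numbers : List Int) : Int × Int × Int :=
  numbers.foldl
    (fun s item =>
      if item < 0 then (s.1 + 1, s.2.1 + item, s.2.2)
      else (s.1, s.2.1, s.2.2 * item))
    (0, 0, 1)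

-- ===== PORT B =====
def sum_sab_numbers_alt (numbers : List Int) : Int × Int × Int :=
  let negs := numbers.filter (fun x => x < 0)
  let nonnegs := numbers.filter (fun x => x ≥ 0)
  ((negs.length : Int), negs.sum, nonnegs.foldl (fun p x => p * x) 1)

-- ===== PRECONDITION & SPEC =====
def Spec_sum_sab_numbers (numbers : List Int) (out : Int × Int × Int) : Prop := out = sum_sab_numbers_alt numbers
instance (numbers : List Int) (out : Int × Int × Int) : Decidable (Spec_sum_sab_numbers numbers out) := by unfold Spec_sum_sab_numbers; infer_instance

-- ===== CLAIM (what is proved, stated in full; the proofs are below) =====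
def Claim_equal_sum_sab_numbers : Prop := ∀ (numbers : List Int), Dom_sum_sab_numbers numbers → Spec_sum_sab_numbers numbers (sum_sab_numbers numbers)

-- ===== LEMMAS AND PROOFS =====

theorem sum_sab_foldl_inv (l : List Int) (c s p : Int) :
    l.foldl
      (fun st item =>
        if item < 0 then (st.1 + 1, st.2.1 + item, st.2.2)
        else (st.1, st.2.1, st.2.2 * item))
      (c, s, p)
    = (c + ((l.filter (fun x => x < 0)).length : Int),
       s + (l.filter (fun x => x < 0)).sum,
       (l.filter (fun x => x ≥ 0)).foldl (fun q x => q * x) p) := by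
  induction l generalizing c s p with
  | nil => simp
  | cons h t ih =>
    by_cases hh : h < 0
    · have hh' : ¬ h ≥ 0 := by omega
      simp [List.foldl, hh, hh', ih]
      constructor <;> ring
    · have hh' : h ≥ 0 := by omega
      simp [List.foldl, hh, hh', ih]

-- ===== VERDICT (by name: the statement is the Claim_ definition above) =====
theorem sum_sab_numbers_spec : Claim_equal_sum_sab_numbers := by
  intro numbers _
  unfold Spec_sum_sab_numbers sum_sab_numbers sum_sab_numbers_alt
  rw [sum_sab_foldl_inv]
  simp
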